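-- pv_equiv track=rewrite | github.com/mnicokar/Python-Level-2 | PS14-Mastermind/main.py | getClose
-- ===== SOURCE A (Python) =====
-- def getClose(code, guess):
--
--   #remove correct digits from both strings
--   newCode = ""
--   newGuess = ""
--   for i in range(len(guess)):
--     if code[i] != guess[i]:
--       newCode += code[i]
--       newGuess += guess[i]
--   code = newCode
--   guess = newGuess
--
--   #calculate the correct number of close digits
--   numClose = 0
--   while len(code) > 0:
--     for i in range(len(guess)):
--       if guess[i] == code[0]:
--         guess = guess[0:i] + guess[i+1:]
--         numClose+=1
--         break
--     code = code[1:]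
--   return numClose
-- ===== SOURCE B (Python) =====
-- def getClose(code, guess):
--     # Single pass: count mismatched symbols on each side, then sum per-symbol minima.
--     codeCounts = {}
--     guessCounts = {}
--     for a, b in zip(code, guess):
--         if a != b:
--             codeCounts[a] = codeCounts.get(a, 0) + 1
--             guessCounts[b] = guessCounts.get(b, 0) + 1
--     return sum(min(n, guessCounts.get(ch, 0)) for ch, n in codeCounts.items())
-- ===== Notes on version B (the rewrite author's own statement) =====
-- stated objective: faster
-- what changed: Replaces A's quadratic greedy loop (repeatedly rescanning and re-slicing the guess string for each leftover code character) with one pass over zip(code, guess) building two mismatch counters, returning the sum of per-symbol minima.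
import Mathlib
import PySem

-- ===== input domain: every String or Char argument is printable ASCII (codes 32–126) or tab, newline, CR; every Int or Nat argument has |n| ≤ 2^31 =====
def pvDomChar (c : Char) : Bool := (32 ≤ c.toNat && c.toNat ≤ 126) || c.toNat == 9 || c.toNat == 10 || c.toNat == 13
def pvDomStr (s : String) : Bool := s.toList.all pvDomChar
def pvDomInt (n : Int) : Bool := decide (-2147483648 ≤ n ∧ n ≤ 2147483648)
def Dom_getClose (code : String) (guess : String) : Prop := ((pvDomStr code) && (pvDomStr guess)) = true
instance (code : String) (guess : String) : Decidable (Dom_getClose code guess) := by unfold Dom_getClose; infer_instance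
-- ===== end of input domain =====

-- B replaces A's quadratic greedy rescan of the guess with one linear pass building
-- two mismatch counters and summing per-symbol minima (objective: faster, asymptotic).

-- ===== PORT A =====
-- phase 1: for i in range(len(guess)): keep code[i], guess[i] where they differ
-- (under Pre_ len guess ≤ len code, so paired structural recursion is exact)
def pvAFilter : List Char → List Char → List Char × List Char
  | c :: cs, g :: gs =>
      let p := pvAFilter cs gs
      if c ≠ g then (c :: p.1, g :: p.2) else p
  | _, _ => ([], [])

-- inner for-loop: remove the first guess char equal to c (guess[0:i] + guess[i+1:]); none = no break
def pvAInner : List Char → Char → Option (List Char)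
  | [], _ => none
  | g :: gs, c => if g = c then some gs else (pvAInner gs c).map (g :: ·)

-- while len(code) > 0: try to remove code[0] from guess, counting successes
def pvAWhile : List Char → List Char → Int → Int
  | [], _, n => n
  | c :: cs, g, n =>
      match pvAInner g c with
      | some g' => pvAWhile cs g' (n + 1)
      | none => pvAWhile cs g n

def getClose (code : String) (guess : String) : Int :=
  let p := pvAFilter code.toList guess.toList
  pvAWhile p.1 p.2 0

-- ===== PORT B =====
-- one pass over zip(code, guess): two counters of mismatched symbols
def pvBCount (code : List Char) (guess : List Char) :
    PySem.Dict Char Int × PySem.Dict Char Int :=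
  (code.zip guess).foldl
    (fun st p =>
      if p.1 ≠ p.2 then
        (st.1.insert p.1 (st.1.getD p.1 0 + 1), st.2.insert p.2 (st.2.getD p.2 0 + 1))
      else st)
    (PySem.Dict.empty, PySem.Dict.empty)

def getClose_alt (code : String) (guess : String) : Int :=
  let st := pvBCount code.toList guess.toList
  (st.1.items.map (fun p => min p.2 (st.2.getD p.1 0))).sum

-- ===== PRECONDITION & SPEC =====
-- Pre_ excludes exactly the inputs with len(guess) > len(code), where Python A raises IndexError at code[i].
def Pre_getClose (code : String) (guess : String) : Prop :=
  guess.toList.length ≤ code.toList.length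
instance (code : String) (guess : String) : Decidable (Pre_getClose code guess) := by
  unfold Pre_getClose; infer_instance
def pvWitness_getClose : String × String := ("123", "132")

def Spec_getClose (code : String) (guess : String) (out : Int) : Prop := out = getClose_alt code guess
instance (code : String) (guess : String) (out : Int) : Decidable (Spec_getClose code guess out) := by unfold Spec_getClose; infer_instance

-- ===== CLAIM (what is proved, stated in full; the proofs are below) =====
def Claim_equal_getClose : Prop := ∀ (code : String) (guess : String), Dom_getClose code guess → Pre_getClose code guess → Spec_getClose code guess (getClose code guess)

-- ===== LEMMAS AND PROOFS =====

-- pvAInner removes the first occurrence of c, i.e. List.erase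
theorem pvAInner_eq (g : List Char) (c : Char) :
    pvAInner g c = if c ∈ g then some (g.erase c) else none := by
  induction g with
  | nil => simp [pvAInner]
  | cons x gs ih =>
      by_cases hx : x = c
      · subst hx; simp [pvAInner]
      · have hcx : ¬ c = x := fun h => hx h.symm
        simp only [pvAInner, if_neg hx, ih, List.mem_cons, List.erase_cons]
        by_cases hc : c ∈ gs
        · simp [hc, hcx, hx]
        · simp [hc, hcx]

-- A's while loop counts the multiset intersection
theorem pvAWhile_eq (cs : List Char) : ∀ (g : List Char) (n : Int),
    pvAWhile cs g n = n + (((cs : Multiset Char)) ∩ (↑g)).card := by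
  induction cs with
  | nil => intro g n; simp [pvAWhile]
  | cons c cs ih =>
      intro g n
      rw [pvAWhile, pvAInner_eq]
      by_cases hc : c ∈ g
      · rw [if_pos hc]
        show pvAWhile cs (g.erase c) (n + 1) = _
        rw [ih]
        have : ((c :: cs : List Char) : Multiset Char) ∩ ↑g
            = c ::ₘ ((cs : Multiset Char) ∩ ((g : Multiset Char).erase c)) := by
          rw [← Multiset.cons_coe]
          exact Multiset.cons_inter_of_pos _ (by simpa using hc)
        rw [this]
        simp only [Multiset.card_cons]
        push_cast
        rw [Multiset.coe_erase]
        ring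
      · rw [if_neg hc]
        show pvAWhile cs g n = _
        rw [ih]
        have : ((c :: cs : List Char) : Multiset Char) ∩ ↑g
            = (cs : Multiset Char) ∩ ↑g := by
          rw [← Multiset.cons_coe]
          exact Multiset.cons_inter_of_neg _ (by simpa using hc)
        rw [this]

-- A's phase 1 is the mismatch projections of the zip
theorem pvAFilter_eq (cs : List Char) : ∀ (gs : List Char),
    pvAFilter cs gs =
      (((cs.zip gs).filter (fun p => p.1 != p.2)).map Prod.fst,
       ((cs.zip gs).filter (fun p => p.1 != p.2)).map Prod.snd) := by
  induction cs with
  | nil => intro gs; cases gs <;> simp [pvAFilter]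
  | cons c cs ih =>
      intro gs
      cases gs with
      | nil => simp [pvAFilter]
      | cons g gs =>
          by_cases h : c = g
          · simp [pvAFilter, h, ih]
          · simp [pvAFilter, h, ih, bne_iff_ne]

-- B's paired fold splits into two independent counter folds
theorem pvBCount_split (ps : List (Char × Char)) :
    ∀ (cc gc : PySem.Dict Char Int),
    ps.foldl
      (fun st p =>
        if p.1 ≠ p.2 then
          (st.1.insert p.1 (st.1.getD p.1 0 + 1), st.2.insert p.2 (st.2.getD p.2 0 + 1))
        else st) (cc, gc)
    = (((ps.filter (fun p => p.1 != p.2)).map Prod.fst).foldl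
         (fun d x => d.insert x (d.getD x 0 + 1)) cc,
       ((ps.filter (fun p => p.1 != p.2)).map Prod.snd).foldl
         (fun d x => d.insert x (d.getD x 0 + 1)) gc) := by
  induction ps with
  | nil => intro cc gc; simp
  | cons p ps ih =>
      intro cc gc
      simp only [List.foldl_cons, List.filter_cons]
      by_cases h : p.1 = p.2
      · rw [if_neg (not_not_intro h), if_neg (by simp [h])]
        exact ih cc gc
      · rw [if_pos h, if_pos (by simp [h])]
        simp only [List.map_cons, List.foldl_cons]
        exact ih _ _

-- the per-symbol minima sum is the multiset intersection card
theorem sum_min_eq_inter (nc ng : List Char) :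
    ((PySem.Set.ofList nc).map
        (fun k => min ((nc.count k : Int)) ((ng.count k : Int)))).sum
      = ((((nc : Multiset Char)) ∩ (↑ng)).card : Int) := by
  classical
  rw [← List.sum_toFinset _ (PySem.Set.nodup_ofList nc)]
  have hfs : (PySem.Set.ofList nc).toFinset = nc.toFinset := by
    ext a
    simp [PySem.Set.mem_ofList]
  rw [hfs]
  have hterm : ∀ a ∈ nc.toFinset,
      min ((nc.count a : Int)) ((ng.count a : Int))
        = ((((nc : Multiset Char) ∩ ↑ng).count a : Nat) : Int) := by
    intro a _
    rw [Multiset.count_inter, Multiset.coe_count, Multiset.coe_count, Nat.cast_min]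
  rw [Finset.sum_congr rfl hterm, ← Nat.cast_sum]
  congr 1
  rw [← Multiset.toFinset_sum_count_eq ((nc : Multiset Char) ∩ ↑ng)]
  have hsub : ((nc : Multiset Char) ∩ ↑ng).toFinset ⊆ nc.toFinset := by
    intro a ha
    simp only [Multiset.mem_toFinset, Multiset.mem_inter] at ha
    simpa [List.mem_toFinset] using ha.1
  exact (Finset.sum_subset hsub (fun a _ ha =>
    Multiset.count_eq_zero.mpr (by simpa [Multiset.mem_toFinset] using ha))).symm

-- ===== VERDICT (by name: the statement is the Claim_ definition above) =====
theorem getClose_spec : Claim_equal_getClose := by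
  intro code guess _ _
  unfold Spec_getClose getClose getClose_alt pvBCount
  rw [pvAFilter_eq, pvBCount_split]
  simp only [PySem.Dict.foldl_insert_getD_add_one_eq_counter]
  rw [pvAWhile_eq]
  simp only [PySem.Dict.items_counter, List.map_map, PySem.Dict.getD_counter]
  rw [← sum_min_eq_inter]
  simp [Function.comp_def]
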